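-- pv_equiv track=rewrite | github.com/dhmit/gender_analysis | gender_analysis/analysis/gender_tokens.py | _merge_token_occurrences
-- ===== SOURCE A (Python) =====
-- def _merge_token_occurrences(token_frequencies):
--     """
--     A private helper function for combining multiple dictionaries of the shape token_frequency
--     into a single token_frequency.
--
--     :param token_frequencies: a list of the shape [{str: int, ...}, ...]
--     :return: a dictionary of the same shape as the above, with all key: value pairs merged.
--
--     >>> test_1 = { 'good': 1, 'bad': 1, 'ugly': 1 }
--     >>> test_2 = { 'good': 3, 'bad': 0, 'weird': 2 }
--     >>> test_3 = { 'good': 2, 'bad': 4, 'weird': 0, 'ugly': 2 }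
--     >>> merged_token_frequency = _merge_token_occurrences([test_1, test_2, test_3])
--     >>> merged_token_frequency
--     {'good': 6, 'bad': 5, 'ugly': 3, 'weird': 2}
--     """
--
--     merged_token_frequencies = {}
--     for token_frequency in token_frequencies:
--         for (key, value) in token_frequency.items():
--             if key in merged_token_frequencies:
--                 merged_token_frequencies[key] += value
--             else:
--                 merged_token_frequencies[key] = value
--     return merged_token_frequencies
-- ===== SOURCE B (Python) =====
-- def _merge_token_occurrences(token_frequencies):
--     # Pass 1 (group): collect, per token, the list of all its counts, in first-seen token order.
--     occurrences = {}
--     for token_frequency in token_frequencies: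
--         for (token, count) in token_frequency.items():
--             occurrences.setdefault(token, []).append(count)
--     # Pass 2 (reduce): sum each token's collected counts.
--     return {token: sum(counts) for (token, counts) in occurrences.items()}
-- ===== Notes on version B (the rewrite author's own statement) =====
-- stated objective: alternative
-- what changed: Replaces A's interleaved running integer totals by a group-then-reduce shape: a first pass collects, per token, the list of all its counts (setdefault/append), and a second pass builds the result by summing each token's collected list.
import Mathlib
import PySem

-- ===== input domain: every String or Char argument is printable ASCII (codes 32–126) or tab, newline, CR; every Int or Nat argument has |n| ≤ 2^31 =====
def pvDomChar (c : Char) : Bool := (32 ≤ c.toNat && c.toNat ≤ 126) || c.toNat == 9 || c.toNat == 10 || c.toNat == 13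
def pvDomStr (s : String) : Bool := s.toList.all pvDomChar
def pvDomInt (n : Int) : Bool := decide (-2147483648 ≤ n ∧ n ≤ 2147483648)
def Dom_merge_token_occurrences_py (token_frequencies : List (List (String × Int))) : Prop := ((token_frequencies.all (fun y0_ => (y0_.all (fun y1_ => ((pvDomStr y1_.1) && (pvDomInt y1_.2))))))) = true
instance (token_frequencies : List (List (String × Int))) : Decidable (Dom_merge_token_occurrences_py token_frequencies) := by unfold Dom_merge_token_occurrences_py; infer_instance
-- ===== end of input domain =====

-- ===== PORT A =====
-- B changes the decomposition: it groups each token's counts into a list first, then sums per token (group-then-reduce); same results, similar cost.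
def pvStepA (m : PySem.Dict String Int) (kv : String × Int) : PySem.Dict String Int :=
  if m.contains kv.1 then m.modify kv.1 0 (· + kv.2) else m.insert kv.1 kv.2

def merge_token_occurrences_py (token_frequencies : List (List (String × Int))) : List (String × Int) :=
  (token_frequencies.foldl (fun m d => d.foldl pvStepA m) PySem.Dict.empty).items

-- ===== PORT B =====
-- Python's 'occurrences.setdefault(token, []).append(count)' sets
-- occurrences[token] = occurrences.get(token, []) + [count], i.e. Dict.modify token [] (· ++ [count]) (exact).
def merge_token_occurrences_py_alt (token_frequencies : List (List (String × Int))) : List (String × Int) :=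
  (token_frequencies.foldl
      (fun occ d => d.foldl (fun occ kv => occ.modify kv.1 ([] : List Int) (fun xs => xs ++ [kv.2])) occ)
      (PySem.Dict.empty : PySem.Dict String (List Int))).items.map (fun p => (p.1, p.2.sum))

-- ===== PRECONDITION & SPEC =====
-- Pre_ excludes association lists with duplicate keys inside one inner list: such a list does not
-- represent any Python dict, so no Python input is excluded (A's input dicts always have unique keys).
def Pre_merge_token_occurrences_py (token_frequencies : List (List (String × Int))) : Prop :=
  ∀ d ∈ token_frequencies, (d.map Prod.fst).Nodup
instance (token_frequencies : List (List (String × Int))) : Decidable (Pre_merge_token_occurrences_py token_frequencies) := by unfold Pre_merge_token_occurrences_py; infer_instance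

def pvWitness_merge_token_occurrences_py : (List (List (String × Int))) :=
  [[("good", 1), ("bad", 1), ("ugly", 1)], [("good", 3), ("bad", 0), ("weird", 2)]]

def Spec_merge_token_occurrences_py (token_frequencies : List (List (String × Int))) (out : List (String × Int)) : Prop := out = merge_token_occurrences_py_alt token_frequencies
instance (token_frequencies : List (List (String × Int))) (out : List (String × Int)) : Decidable (Spec_merge_token_occurrences_py token_frequencies out) := by unfold Spec_merge_token_occurrences_py; infer_instance

-- ===== CLAIM (what is proved, stated in full; the proofs are below) =====
def Claim_equal_merge_token_occurrences_py : Prop := ∀ (token_frequencies : List (List (String × Int))), Dom_merge_token_occurrences_py token_frequencies → Pre_merge_token_occurrences_py token_frequencies → Spec_merge_token_occurrences_py token_frequencies (merge_token_occurrences_py token_frequencies)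

-- ===== LEMMAS AND PROOFS =====

theorem pvStepA_keys (m : PySem.Dict String Int) (kv : String × Int) :
    (pvStepA m kv).keys = PySem.Set.add m.keys kv.1 := by
  unfold pvStepA
  by_cases h : m.contains kv.1 = true
  · rw [if_pos h, PySem.Dict.keys_modify, PySem.Dict.keys_insert_of_contains _ _ h,
      PySem.Set.add_of_mem ((PySem.Dict.contains_iff_mem_keys m kv.1).mp h)]
  · rw [if_neg h, PySem.Dict.keys_insert_of_not_contains m _ (by simpa using h),
      PySem.Set.add_of_not_mem (fun hk => h ((PySem.Dict.contains_iff_mem_keys m kv.1).mpr hk))]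

theorem pvStepA_getD (m : PySem.Dict String Int) (kv : String × Int) (k : String) :
    (pvStepA m kv).getD k 0 = m.getD k 0 + (if k = kv.1 then kv.2 else 0) := by
  unfold pvStepA
  by_cases h : m.contains kv.1 = true
  · rw [if_pos h, PySem.Dict.getD_modify]
    by_cases hk : k = kv.1
    · subst hk; simp
    · simp [hk]
  · rw [if_neg h, PySem.Dict.getD_insert]
    by_cases hk : k = kv.1
    · subst hk
      simp [PySem.Dict.getD_of_not_contains m 0 (by simpa using h)]
    · simp [hk]

theorem pvMergeOne_keys (d : List (String × Int)) (m : PySem.Dict String Int) :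
    (d.foldl pvStepA m).keys = PySem.Set.update m.keys (d.map Prod.fst) := by
  induction d generalizing m with
  | nil => simp [PySem.Set.update]
  | cons kv d' ih =>
    simp only [List.foldl_cons, List.map_cons, PySem.Set.update_cons]
    rw [ih, pvStepA_keys]

theorem pvMkNil_getD (k : String) : (PySem.Dict.mk ([] : List (String × Int))).getD k 0 = 0 := by
  simp [PySem.Dict.getD, PySem.Dict.get?]

theorem pvMk_cons_getD (kv : String × Int) (d : List (String × Int)) (k : String) :
    (PySem.Dict.mk (kv :: d)).getD k 0
      = if kv.1 = k then kv.2 else (PySem.Dict.mk d).getD k 0 := by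
  rw [PySem.Dict.getD_eq_get?_getD, PySem.Dict.get?_mk_cons]
  by_cases h : kv.1 = k
  · simp [h]
  · simp [h, ← PySem.Dict.getD_eq_get?_getD]

theorem pvMergeOne_getD (d : List (String × Int)) (m : PySem.Dict String Int) (k : String)
    (hd : (d.map Prod.fst).Nodup) :
    (d.foldl pvStepA m).getD k 0 = m.getD k 0 + (PySem.Dict.mk d).getD k 0 := by
  induction d generalizing m with
  | nil => simp [pvMkNil_getD]
  | cons kv d' ih =>
    simp only [List.map_cons, List.nodup_cons] at hd
    simp only [List.foldl_cons]
    rw [ih _ hd.2, pvStepA_getD, pvMk_cons_getD]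
    by_cases h : kv.1 = k
    · subst h
      have hz : (PySem.Dict.mk d').getD kv.1 0 = 0 := by
        apply PySem.Dict.getD_of_get?_eq_none
        rw [PySem.Dict.get?_eq_none_iff_not_mem_keys]
        simpa using hd.1
      simp [hz]
    · have hk : ¬ k = kv.1 := fun he => h he.symm
      simp [h, hk]

theorem pvMain (tf : List (List (String × Int))) (m : PySem.Dict String Int)
    (hm : m.keys.Nodup) (hpre : ∀ d ∈ tf, (d.map Prod.fst).Nodup) :
    (tf.foldl (fun m d => d.foldl pvStepA m) m).items
      = (tf.foldl (fun ks d => PySem.Set.update ks (d.map Prod.fst)) m.keys).map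
          (fun k => (k, m.getD k 0 + tf.foldl (fun s d => s + (PySem.Dict.mk d).getD k 0) 0)) := by
  induction tf generalizing m with
  | nil => simpa using PySem.Dict.items_eq_map_keys m hm 0
  | cons d tf' ih =>
    simp only [List.foldl_cons]
    rw [ih (d.foldl pvStepA m)
        (by rw [pvMergeOne_keys]; exact PySem.Set.nodup_update _ _ hm)
        (fun d' hd' => hpre d' (List.mem_cons_of_mem _ hd'))]
    rw [pvMergeOne_keys]
    refine List.map_congr_left ?_
    intro k _
    rw [pvMergeOne_getD d m k (hpre d (List.mem_cons_self ..))]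
    rw [PySem.List.foldl_add, PySem.List.foldl_add]
    ring_nf

theorem pvOccKeys (tf : List (List (String × Int))) (o : PySem.Dict String (List Int)) :
    (tf.foldl (fun occ d =>
        d.foldl (fun occ kv => occ.modify kv.1 ([] : List Int) (fun xs => xs ++ [kv.2])) occ) o).keys
      = tf.foldl (fun ks d => PySem.Set.update ks (d.map Prod.fst)) o.keys := by
  induction tf generalizing o with
  | nil => rfl
  | cons d tf' ih =>
    simp only [List.foldl_cons]
    rw [ih, PySem.Dict.keys_foldl_modify_key]

theorem pvOccGetD (tf : List (List (String × Int))) (o : PySem.Dict String (List Int)) (k : String) :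
    (tf.foldl (fun occ d =>
        d.foldl (fun occ kv => occ.modify kv.1 ([] : List Int) (fun xs => xs ++ [kv.2])) occ) o).getD k []
      = o.getD k [] ++ (tf.map (fun d => (d.filter (fun p => p.1 == k)).map (fun p => p.2))).flatten := by
  induction tf generalizing o with
  | nil => simp
  | cons d tf' ih =>
    simp only [List.foldl_cons, List.map_cons, List.flatten_cons]
    rw [ih, PySem.Dict.getD_foldl_modify_append, List.append_assoc]

theorem pvFilterSum (d : List (String × Int)) (k : String) (hd : (d.map Prod.fst).Nodup) :
    ((d.filter (fun p => p.1 == k)).map (fun p => p.2)).sum = (PySem.Dict.mk d).getD k 0 := by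
  induction d with
  | nil => simp [pvMkNil_getD]
  | cons kv d' ih =>
    simp only [List.map_cons, List.nodup_cons] at hd
    rw [pvMk_cons_getD]
    by_cases h : kv.1 = k
    · subst h
      have hnil : d'.filter (fun p => p.1 == kv.1) = [] := by
        rw [List.filter_eq_nil_iff]
        intro p hp hbeq
        exact hd.1 (List.mem_map.mpr ⟨p, hp, by simpa using hbeq⟩)
      simp [hnil]
    · have hne : ¬ (kv.1 == k) = true := by simpa using h
      simp [hne, h, ih hd.2]

theorem pvFoldNodup (tf : List (List (String × Int))) (ks : List String) (h : ks.Nodup) :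
    (tf.foldl (fun ks d => PySem.Set.update ks (d.map Prod.fst)) ks).Nodup := by
  induction tf generalizing ks with
  | nil => exact h
  | cons d tf' ih => exact ih _ (PySem.Set.nodup_update _ _ h)

-- ===== VERDICT (by name: the statement is the Claim_ definition above) =====
theorem merge_token_occurrences_py_spec : Claim_equal_merge_token_occurrences_py := by
  intro tf _ hpre
  unfold Spec_merge_token_occurrences_py merge_token_occurrences_py merge_token_occurrences_py_alt
  rw [pvMain tf PySem.Dict.empty PySem.Dict.nodup_keys_empty hpre]
  have hkeys := pvOccKeys tf PySem.Dict.empty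
  have hnodup : (tf.foldl (fun occ d =>
      d.foldl (fun occ kv => occ.modify kv.1 ([] : List Int) (fun xs => xs ++ [kv.2])) occ)
      (PySem.Dict.empty : PySem.Dict String (List Int))).keys.Nodup := by
    rw [hkeys]
    exact pvFoldNodup tf _ (by simp [PySem.Dict.keys_empty])
  rw [PySem.Dict.items_eq_map_keys _ hnodup ([] : List Int), List.map_map, hkeys]
  simp only [PySem.Dict.keys_empty]
  refine List.map_congr_left ?_
  intro k _
  simp only [Function.comp_apply]
  rw [pvOccGetD, PySem.Dict.getD_empty, PySem.Dict.getD_empty, List.nil_append,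
    List.sum_flatten, List.map_map, PySem.List.foldl_add, zero_add, zero_add]
  refine congrArg (fun z => (k, z)) ?_
  refine congrArg List.sum ?_
  refine (List.map_congr_left ?_).symm
  intro d hd
  exact pvFilterSum d k (hpre d hd)
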